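-- pv_equiv track=rewrite | github.com/shivap483/data-structures | G4G_python/g4g_array_rotation/largest_pair_sum.py | findLargestSum
-- ===== SOURCE A (Python) =====
-- def findLargestSum(array):
--     if(array[0]>array[1]):
--         first=array[0]
--         second=array[1]
--     else:
--         second=array[0]
--         first=array[1]
--
--     for i in array[2:]:
--         if i>first:
--             second=first
--             first=i
--         elif i>second:
--             second=i
--     return first+second
-- ===== SOURCE B (Python) =====
-- def findLargestSum(array):
--     s = sorted(array)
--     return s[-1] + s[-2]
-- ===== Notes on version B (the rewrite author's own statement) =====
-- stated objective: simpler
-- what changed: Replaces the single-pass first/second tracking loop with sorting a copy and summing the last two elements.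
import Mathlib
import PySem

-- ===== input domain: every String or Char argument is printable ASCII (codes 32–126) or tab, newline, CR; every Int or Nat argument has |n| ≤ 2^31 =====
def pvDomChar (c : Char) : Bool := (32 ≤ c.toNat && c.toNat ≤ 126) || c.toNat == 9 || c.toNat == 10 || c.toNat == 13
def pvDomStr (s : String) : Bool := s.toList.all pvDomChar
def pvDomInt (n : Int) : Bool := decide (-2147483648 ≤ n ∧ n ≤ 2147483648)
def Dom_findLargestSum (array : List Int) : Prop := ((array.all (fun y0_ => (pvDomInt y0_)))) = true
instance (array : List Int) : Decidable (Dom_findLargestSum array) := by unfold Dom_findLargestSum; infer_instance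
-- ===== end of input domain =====

-- B replaces A's single-pass first/second tracking loop by sorting a copy and summing the last two elements (simpler; return value only, neither mutates its argument).


-- ===== PORT A =====
-- the loop body: if i>first: second,first = first,i elif i>second: second=i
def pvStep (p : Int × Int) (i : Int) : Int × Int :=
  if i > p.1 then (i, p.1) else if i > p.2 then (p.1, i) else p

def findLargestSum (array : List Int) : Int :=
  match array with
  | a :: b :: t =>   -- array[0], array[1] exist; array[2:] = t
      let init := if a > b then (a, b) else (b, a)
      let p := t.foldl pvStep init
      p.1 + p.2
  | _ => 0           -- Python raises IndexError here; outside Pre_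

-- ===== PORT B =====
def findLargestSum_alt (array : List Int) : Int :=
  let s := PySem.List.sorted array (fun x => x) false
  (PySem.List.pyGet? s (-1)).getD 0 + (PySem.List.pyGet? s (-2)).getD 0
  -- .getD 0: Python raises IndexError when len < 2; outside Pre_

-- ===== PRECONDITION & SPEC =====
-- Pre_ excludes exactly the inputs (length < 2) on which BOTH Pythons raise IndexError.
def Pre_findLargestSum (array : List Int) : Prop := 2 ≤ array.length
instance (array : List Int) : Decidable (Pre_findLargestSum array) := by unfold Pre_findLargestSum; infer_instance
def pvWitness_findLargestSum : List Int := [3, 1, 4]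

def Spec_findLargestSum (array : List Int) (out : Int) : Prop := out = findLargestSum_alt array
instance (array : List Int) (out : Int) : Decidable (Spec_findLargestSum array out) := by unfold Spec_findLargestSum; infer_instance

-- ===== CLAIM (what is proved, stated in full; the proofs are below) =====
def Claim_equal_findLargestSum : Prop := ∀ (array : List Int), Dom_findLargestSum array → Pre_findLargestSum array → Spec_findLargestSum array (findLargestSum array)

-- ===== LEMMAS AND PROOFS =====

-- (f, s) are "a top-two pair" of xs: s ≤ f and xs is a permutation of s :: f :: r with everything in r ≤ s.
def pvGood (xs : List Int) (p : Int × Int) : Prop :=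
  p.2 ≤ p.1 ∧ ∃ r, xs.Perm (p.2 :: p.1 :: r) ∧ ∀ x ∈ r, x ≤ p.2

theorem pvPermRot (i s f : Int) (r : List Int) :
    (i :: s :: f :: r).Perm (s :: f :: i :: r) :=
  (List.Perm.swap s i (f :: r)).trans (List.Perm.cons s (List.Perm.swap f i r))

theorem pvGood_step (l : List Int) (p : Int × Int) (i : Int) (h : pvGood l p) :
    pvGood (l ++ [i]) (pvStep p i) := by
  obtain ⟨hle, r, hperm, hr⟩ := h
  have hperm2 : (l ++ [i]).Perm (i :: p.2 :: p.1 :: r) :=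
    (hperm.append_right _).trans ((p.2 :: p.1 :: r).perm_append_singleton i)
  unfold pvStep
  split_ifs with h1 h2
  · refine ⟨le_of_lt h1, p.2 :: r, ?_, ?_⟩
    · show (l ++ [i]).Perm (p.1 :: i :: p.2 :: r)
      exact hperm2.trans ((List.Perm.cons i (List.Perm.swap p.1 p.2 r)).trans
        (List.Perm.swap p.1 i (p.2 :: r)))
    · intro x hx
      rcases List.mem_cons.mp hx with h | h
      · exact h ▸ hle
      · exact le_trans (hr x h) hle
  · refine ⟨le_of_not_gt h1, p.2 :: r, ?_, ?_⟩
    · show (l ++ [i]).Perm (i :: p.1 :: p.2 :: r)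
      exact hperm2.trans (List.Perm.cons i (List.Perm.swap p.1 p.2 r))
    · intro x hx
      rcases List.mem_cons.mp hx with h | h
      · exact h ▸ le_of_lt h2
      · exact le_trans (hr x h) (le_of_lt h2)
  · refine ⟨hle, i :: r, ?_, ?_⟩
    · show (l ++ [i]).Perm (p.2 :: p.1 :: i :: r)
      exact hperm2.trans (pvPermRot i p.2 p.1 r)
    · intro x hx
      rcases List.mem_cons.mp hx with h | h
      · exact h ▸ le_of_not_gt h2
      · exact hr x h

theorem pvGood_foldl (t : List Int) : ∀ (l : List Int) (p : Int × Int),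
    pvGood l p → pvGood (l ++ t) (t.foldl pvStep p) := by
  induction t with
  | nil => intro l p h; simpa using h
  | cons i t ih =>
      intro l p h
      have := ih (l ++ [i]) (pvStep p i) (pvGood_step l p i h)
      simpa [List.foldl] using this

-- any two top-two pairs of the same list have the same sum
theorem pvGood_sum_eq (xs : List Int) (p q : Int × Int)
    (hp : pvGood xs p) (hq : pvGood xs q) : p.1 + p.2 = q.1 + q.2 := by
  obtain ⟨hple, r, hperm, hr⟩ := hp
  obtain ⟨hqle, r', hperm', hr'⟩ := hq
  -- p.1 and q.1 are both the maximum of xs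
  have hmem : ∀ (z : List Int) (w : Int × Int), w.2 ≤ w.1 → xs.Perm (w.2 :: w.1 :: z) →
      (∀ x ∈ z, x ≤ w.2) → w.1 ∈ xs ∧ ∀ x ∈ xs, x ≤ w.1 := by
    intro z w hw hpm hz
    refine ⟨hpm.mem_iff.mpr (by simp), ?_⟩
    intro x hx
    rcases List.mem_cons.mp (hpm.mem_iff.mp hx) with h | h
    · exact h.le.trans hw
    · rcases List.mem_cons.mp h with h2 | h2
      · exact h2.le
      · exact le_trans (hz x h2) hw
  obtain ⟨hp1mem, hp1max⟩ := hmem r p hple hperm hr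
  obtain ⟨hq1mem, hq1max⟩ := hmem r' q hqle hperm' hr'
  have hfst : p.1 = q.1 := le_antisymm (hq1max _ hp1mem) (hp1max _ hq1mem)
  -- cancel the shared maximum in the multiset and take the maximum again
  have hm : p.2 ::ₘ p.1 ::ₘ (r : Multiset Int) = q.2 ::ₘ q.1 ::ₘ (r' : Multiset Int) :=
    Multiset.coe_eq_coe.mpr (hperm.symm.trans hperm')
  have h3 : p.1 ::ₘ p.2 ::ₘ (r : Multiset Int) = q.1 ::ₘ q.2 ::ₘ (r' : Multiset Int) := by
    rw [Multiset.cons_swap p.1 p.2, Multiset.cons_swap q.1 q.2]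
    exact hm
  rw [hfst] at h3
  have hm2 : p.2 ::ₘ (r : Multiset Int) = q.2 ::ₘ (r' : Multiset Int) :=
    (Multiset.cons_inj_right q.1).mp h3
  have hp2mem : p.2 ∈ p.2 ::ₘ (r : Multiset Int) := Multiset.mem_cons_self _ _
  have hq2mem : q.2 ∈ p.2 ::ₘ (r : Multiset Int) := by
    rw [hm2]; exact Multiset.mem_cons_self _ _
  have hp2max : ∀ x ∈ p.2 ::ₘ (r : Multiset Int), x ≤ p.2 := by
    intro x hx
    rcases Multiset.mem_cons.mp hx with h | h
    · exact h.le
    · exact hr x (by simpa using h)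
  have hq2max : ∀ x ∈ p.2 ::ₘ (r : Multiset Int), x ≤ q.2 := by
    intro x hx
    rw [hm2] at hx
    rcases Multiset.mem_cons.mp hx with h | h
    · exact h.le
    · exact hr' x (by simpa using h)
  have hsnd : p.2 = q.2 := le_antisymm (hq2max _ hp2mem) (hp2max _ hq2mem)
  rw [hfst, hsnd]

-- A's result is a top-two pair of the whole list
theorem pvGood_A (a b : Int) (t : List Int) :
    pvGood (a :: b :: t) (t.foldl pvStep (if a > b then (a, b) else (b, a))) := by
  have hinit : pvGood [a, b] (if a > b then (a, b) else (b, a)) := by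
    split_ifs with h
    · exact ⟨h.le, [], List.Perm.swap b a [], by simp⟩
    · exact ⟨le_of_not_gt h, [], List.Perm.refl _, by simp⟩
  simpa using pvGood_foldl t [a, b] _ hinit

-- the sorted list's last two elements are a top-two pair, and B returns their sum
theorem pv_B_good (xs : List Int) (h : 2 ≤ xs.length) :
    ∃ f s : Int, findLargestSum_alt xs = f + s ∧ pvGood xs (f, s) := by
  set d := PySem.List.sorted xs (fun x => x) false with hd
  have hperm : d.Perm xs := PySem.List.sorted_perm xs _ _
  have hlen : 2 ≤ d.length := by rw [hperm.length_eq]; exact h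
  have hpw : d.Pairwise (fun a b => a ≤ b) := by
    simpa using PySem.List.sorted_pairwise xs (fun x => x)
  have hlenr : 2 ≤ d.reverse.length := by simpa using hlen
  -- peel the last two elements off d
  obtain ⟨f, s, r'', hrev⟩ : ∃ f s r'', d.reverse = f :: s :: r'' := by
    rcases hrv : d.reverse with _ | ⟨f, _ | ⟨s, r''⟩⟩
    · rw [hrv] at hlenr; simp at hlenr
    · rw [hrv] at hlenr; simp at hlenr
    · exact ⟨f, s, r'', rfl⟩
  have hdeq : d = r''.reverse ++ [s, f] := by
    have := congrArg List.reverse hrev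
    simpa using this
  rw [hdeq] at hpw
  rw [List.pairwise_append] at hpw
  obtain ⟨-, hpw2, hcross⟩ := hpw
  have hsf : s ≤ f := by simpa using hpw2
  refine ⟨f, s, ?_, hsf, r''.reverse, ?_, ?_⟩
  · -- B's value: d[-1] = f, d[-2] = s
    show (PySem.List.pyGet? d (-1)).getD 0 + (PySem.List.pyGet? d (-2)).getD 0 = f + s
    have h1 : PySem.List.pyGet? d (-1) = some f := by
      rw [hdeq]
      rw [show r''.reverse ++ [s, f] = (r''.reverse ++ [s]) ++ [f] by simp]
      exact PySem.List.pyGet?_neg_one_append_singleton _ _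
    have h2 : PySem.List.pyGet? d (-2) = some s := by
      rw [PySem.List.pyGet?_neg_ofNat d 2 (by omega) (by omega)]
      rw [hdeq]
      rw [show (r''.reverse ++ [s, f]).length - 2 = r''.reverse.length by simp]
      rw [List.getElem?_append_right (le_refl _)]
      simp
    rw [h1, h2]; rfl
  · -- xs ~ s :: f :: r''.reverse
    show xs.Perm (s :: f :: r''.reverse)
    have hd2 : d.Perm (s :: f :: r''.reverse) := by
      rw [hdeq]; exact List.perm_append_comm
    exact hperm.symm.trans hd2
  · intro x hx
    exact hcross x hx s (by simp)

-- ===== VERDICT (by name: the statement is the Claim_ definition above) =====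
theorem findLargestSum_spec : Claim_equal_findLargestSum := by
  intro array _ hpre
  unfold Spec_findLargestSum
  match array, hpre with
  | a :: b :: t, _ =>
    obtain ⟨f, s, hB, hgoodB⟩ := pv_B_good (a :: b :: t) (by simp)
    have hgoodA := pvGood_A a b t
    show (t.foldl pvStep (if a > b then (a, b) else (b, a))).1 +
         (t.foldl pvStep (if a > b then (a, b) else (b, a))).2 = _
    rw [hB]
    exact pvGood_sum_eq (a :: b :: t) _ (f, s) hgoodA hgoodB
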